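-- pv_equiv track=rewrite | github.com/kimyoungjin06/aoe_orch_control | scripts/gateway/aoe_tg_run_handlers.py | _suggest_commands
-- ===== SOURCE A (Python) =====
-- from typing import Any, Callable, Dict, List, Optional
--
-- _KNOWN_COMMANDS = [
--     "help",
--     "status",
--     "check",
--     "task",
--     "monitor",
--     "kpi",
--     "map",
--     "queue",
--     "sync",
--     "next",
--     "fanout",
--     "drain",
--     "auto",
--     "offdesk",
--     "panic",
--     "todo",
--     "room",
--     "gc",
--     "tf",
--     "use",
--     "orch",
--     "mode",
--     "lang",
--     "report",
--     "replay",
--     "ok",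
--     "whoami",
--     "lockme",
--     "onlyme",
--     "acl",
--     "grant",
--     "revoke",
--     "pick",
--     "dispatch",
--     "direct",
--     "cancel",
--     "retry",
--     "replan",
--     "request",
--     "run",
--     "clear",
-- ]
--
-- def _suggest_commands(raw_cmd: str, limit: int = 5) -> List[str]:
--     token = str(raw_cmd or "").strip().lower()
--     if not token:
--         return []
--     exact = [c for c in _KNOWN_COMMANDS if c == token]
--     if exact:
--         return exact
--     starts = [c for c in _KNOWN_COMMANDS if c.startswith(token)]
--     if starts:
--         return starts[: max(1, int(limit))]
--     contains = [c for c in _KNOWN_COMMANDS if token in c]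
--     return contains[: max(1, int(limit))]
-- ===== SOURCE B (Python) =====
-- _KNOWN_COMMANDS = [
--     "help", "status", "check", "task", "monitor", "kpi", "map", "queue",
--     "sync", "next", "fanout", "drain", "auto", "offdesk", "panic", "todo",
--     "room", "gc", "tf", "use", "orch", "mode", "lang", "report", "replay",
--     "ok", "whoami", "lockme", "onlyme", "acl", "grant", "revoke", "pick",
--     "dispatch", "direct", "cancel", "retry", "replan", "request", "run",
--     "clear",
-- ]
--
-- def _suggest_commands(raw_cmd, limit=5):
--     # One classifying pass over the known commands into three priority buckets,
--     # then a single decision, instead of three separate short-circuiting scans.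
--     token = str(raw_cmd or "").strip().lower()
--     if not token:
--         return []
--     exact, starts, contains = [], [], []
--     for c in _KNOWN_COMMANDS:
--         if c == token:
--             exact.append(c)
--         elif c.startswith(token):
--             starts.append(c)
--         elif token in c:
--             contains.append(c)
--     if exact:
--         return exact
--     k = max(1, int(limit))
--     if starts:
--         return starts[:k]
--     return contains[:k]
-- ===== Notes on version B (the rewrite author's own statement) =====
-- stated objective: alternative
-- what changed: Replaces A's three separate short-circuiting filter scans of _KNOWN_COMMANDS by a single classifying pass that buckets each command into exact/prefix/substring with elif priority, followed by one decision on the buckets.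
import Mathlib
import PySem

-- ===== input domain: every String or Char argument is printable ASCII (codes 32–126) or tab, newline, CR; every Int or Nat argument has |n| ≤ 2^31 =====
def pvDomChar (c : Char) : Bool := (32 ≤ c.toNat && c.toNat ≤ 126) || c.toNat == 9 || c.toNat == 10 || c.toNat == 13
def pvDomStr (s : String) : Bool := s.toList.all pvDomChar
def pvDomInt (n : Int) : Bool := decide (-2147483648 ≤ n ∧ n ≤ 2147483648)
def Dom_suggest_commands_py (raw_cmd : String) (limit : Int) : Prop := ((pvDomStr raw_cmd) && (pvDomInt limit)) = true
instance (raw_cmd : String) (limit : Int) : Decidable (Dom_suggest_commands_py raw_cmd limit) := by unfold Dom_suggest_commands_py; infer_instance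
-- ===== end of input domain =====

-- B replaces A's three separate short-circuiting scans by one classifying pass into three
-- priority buckets plus a single decision (alternative decomposition, same cost).


def pvKnown : List String :=
  ["help", "status", "check", "task", "monitor", "kpi", "map", "queue",
   "sync", "next", "fanout", "drain", "auto", "offdesk", "panic", "todo",
   "room", "gc", "tf", "use", "orch", "mode", "lang", "report", "replay",
   "ok", "whoami", "lockme", "onlyme", "acl", "grant", "revoke", "pick",
   "dispatch", "direct", "cancel", "retry", "replan", "request", "run",
   "clear"]

-- ===== PORT A =====
def suggest_commands_py (raw_cmd : String) (limit : Int) : List String :=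
  let token := PySem.Str.lower (PySem.Str.strip raw_cmd)
  if token = "" then []
  else
    let exact := pvKnown.filter (fun c => c == token)
    if exact ≠ [] then exact
    else
      let starts := pvKnown.filter (fun c => PySem.Str.startswith c token)
      if starts ≠ [] then PySem.List.slice starts none (some (max 1 limit))
      else
        let contains := pvKnown.filter (fun c => PySem.Str.isIn token c)
        PySem.List.slice contains none (some (max 1 limit))

-- ===== PORT B =====
def pvClassify (token : String) (acc : List String × List String × List String)
    (c : String) : List String × List String × List String :=
  if c == token then (acc.1 ++ [c], acc.2.1, acc.2.2)
  else if PySem.Str.startswith c token then (acc.1, acc.2.1 ++ [c], acc.2.2)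
  else if PySem.Str.isIn token c then (acc.1, acc.2.1, acc.2.2 ++ [c])
  else acc

def suggest_commands_py_alt (raw_cmd : String) (limit : Int) : List String :=
  let token := PySem.Str.lower (PySem.Str.strip raw_cmd)
  if token = "" then []
  else
    let r := pvKnown.foldl (pvClassify token) ([], [], [])
    if r.1 ≠ [] then r.1
    else
      let k := max 1 limit
      if r.2.1 ≠ [] then PySem.List.slice r.2.1 none (some k)
      else PySem.List.slice r.2.2 none (some k)

-- ===== PRECONDITION & SPEC =====
def Spec_suggest_commands_py (raw_cmd : String) (limit : Int) (out : List String) : Prop := out = suggest_commands_py_alt raw_cmd limit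
instance (raw_cmd : String) (limit : Int) (out : List String) : Decidable (Spec_suggest_commands_py raw_cmd limit out) := by unfold Spec_suggest_commands_py; infer_instance

-- ===== CLAIM (what is proved, stated in full; the proofs are below) =====
def Claim_equal_suggest_commands_py : Prop := ∀ (raw_cmd : String) (limit : Int), Dom_suggest_commands_py raw_cmd limit → Spec_suggest_commands_py raw_cmd limit (suggest_commands_py raw_cmd limit)

-- ===== LEMMAS AND PROOFS =====

-- The classifying fold computes the three elif-priority filters, appended to the accumulators.
theorem foldl_classify3 {α : Type} (p q r : α → Bool) (l : List α)
    (e s t : List α) :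
    l.foldl (fun acc c =>
        if p c then (acc.1 ++ [c], acc.2.1, acc.2.2)
        else if q c then (acc.1, acc.2.1 ++ [c], acc.2.2)
        else if r c then (acc.1, acc.2.1, acc.2.2 ++ [c])
        else acc) (e, s, t) =
      (e ++ l.filter p,
       s ++ l.filter (fun c => !p c && q c),
       t ++ l.filter (fun c => !p c && !q c && r c)) := by
  induction l generalizing e s t with
  | nil => simp
  | cons x xs ih =>
    simp only [List.foldl_cons, List.filter_cons]
    by_cases h1 : p x = true
    · simp [h1, ih]
    · by_cases h2 : q x = true
      · simp [h1, h2, ih]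
      · by_cases h3 : r x = true
        · simp [h1, h2, h3, ih]
        · simp [h1, h2, h3, ih]

theorem pvClassify_foldl (token : String) (l : List String) :
    l.foldl (pvClassify token) ([], [], []) =
      (l.filter (fun c => c == token),
       l.filter (fun c => !(c == token) && PySem.Str.startswith c token),
       l.filter (fun c => !(c == token) && !(PySem.Str.startswith c token)
                           && PySem.Str.isIn token c)) := by
  have h := foldl_classify3 (fun c => c == token)
    (fun c => PySem.Str.startswith c token) (fun c => PySem.Str.isIn token c) l [] [] []
  simp only [List.nil_append] at h
  rw [show pvClassify token = (fun (acc : List String × List String × List String) c =>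
      if c == token then (acc.1 ++ [c], acc.2.1, acc.2.2)
      else if PySem.Str.startswith c token then (acc.1, acc.2.1 ++ [c], acc.2.2)
      else if PySem.Str.isIn token c then (acc.1, acc.2.1, acc.2.2 ++ [c])
      else acc) from funext fun _ => funext fun _ => rfl]
  exact h

-- After the exact bucket is empty, the elif-filters coincide with A's unconditional filters.
theorem pickBuckets_eq {α : Type} (l : List α) (p q r : α → Bool) (k : Int) :
    (if l.filter p ≠ [] then l.filter p
     else if l.filter q ≠ [] then PySem.List.slice (l.filter q) none (some k)
     else PySem.List.slice (l.filter r) none (some k))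
    = (if l.filter p ≠ [] then l.filter p
       else if l.filter (fun c => !p c && q c) ≠ [] then
         PySem.List.slice (l.filter (fun c => !p c && q c)) none (some k)
       else PySem.List.slice (l.filter (fun c => !p c && !q c && r c)) none (some k)) := by
  by_cases he : l.filter p ≠ []
  · rw [if_pos he, if_pos he]
  · rw [if_neg he, if_neg he]
    push_neg at he
    have hno : ∀ c ∈ l, p c = false := by
      intro c hc
      by_contra hcc
      have hm : c ∈ l.filter p := by
        rw [List.mem_filter]
        exact ⟨hc, by simpa using hcc⟩
      rw [he] at hm
      exact absurd hm (List.not_mem_nil)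
    have hq : l.filter (fun c => !p c && q c) = l.filter q :=
      List.filter_congr (fun c hc => by rw [hno c hc]; simp)
    rw [hq]
    by_cases hs : l.filter q ≠ []
    · rw [if_pos hs, if_pos hs]
    · rw [if_neg hs, if_neg hs]
      push_neg at hs
      have hnoq : ∀ c ∈ l, q c = false := by
        intro c hc
        by_contra hcc
        have hm : c ∈ l.filter q := by
          rw [List.mem_filter]
          exact ⟨hc, by simpa using hcc⟩
        rw [hs] at hm
        exact absurd hm (List.not_mem_nil)
      have hr : l.filter (fun c => !p c && !q c && r c) = l.filter r :=
        List.filter_congr (fun c hc => by rw [hno c hc, hnoq c hc]; simp)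
      rw [hr]

theorem suggest_commands_py_spec : Claim_equal_suggest_commands_py := by
  intro raw_cmd limit _
  simp only [Spec_suggest_commands_py, suggest_commands_py, suggest_commands_py_alt]
  rw [pvClassify_foldl]
  generalize PySem.Str.lower (PySem.Str.strip raw_cmd) = token
  by_cases h0 : token = ""
  · rw [if_pos h0, if_pos h0]
  · rw [if_neg h0, if_neg h0]
    exact pickBuckets_eq pvKnown
      (fun c => c == token)
      (fun c => PySem.Str.startswith c token)
      (fun c => PySem.Str.isIn token c)
      (max 1 limit)
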